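-- pv_equiv track=rewrite | github.com/manyanxp/MyWork | Python/mylibpy/util/convert.py | to_bcd
-- ===== SOURCE A (Python) =====
-- def to_bcd(n):
--     """整数値をBCDに変換"""
--     if n < 0:
--         return None
--
--     result = 0
--     shift = len(str(n)) -1
--     for s in str(n):
--         b = int(s,16)
--         result |= (b << (4 * shift))
--         shift -= 1
--     return result
-- ===== SOURCE B (Python) =====
-- def to_bcd(n):
--     """整数値をBCDに変換"""
--     if n < 0:
--         return None
--
--     result = 0
--     shift = 0
--     while n > 0:
--         result |= (n % 10) << (4 * shift)
--         shift += 1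
--         n //= 10
--     return result
-- ===== Notes on version B (the rewrite author's own statement) =====
-- stated objective: alternative
-- what changed: B extracts the decimal digits arithmetically (n % 10, n //= 10) least-significant first and ORs each nibble into place with an increasing shift, instead of converting n to a string and parsing each character with int(s, 16) most-significant first.
import Mathlib
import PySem

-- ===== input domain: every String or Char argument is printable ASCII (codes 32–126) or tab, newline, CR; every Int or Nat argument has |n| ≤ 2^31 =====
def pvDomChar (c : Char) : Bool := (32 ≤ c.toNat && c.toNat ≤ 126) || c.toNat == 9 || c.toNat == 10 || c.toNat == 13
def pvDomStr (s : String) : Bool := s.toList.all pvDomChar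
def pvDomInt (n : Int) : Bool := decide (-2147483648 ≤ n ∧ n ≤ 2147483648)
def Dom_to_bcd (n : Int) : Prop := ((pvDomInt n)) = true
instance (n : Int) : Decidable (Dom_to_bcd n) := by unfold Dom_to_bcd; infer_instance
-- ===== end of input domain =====

-- B replaces A's string round-trip (str(n) + int(c,16) per character) by pure arithmetic
-- digit extraction (n % 10, n //= 10), building the BCD value least-significant nibble first.


-- ===== PORT A =====
-- one loop iteration: b = int(s, 16); result |= b << (4*shift); shift -= 1
-- (int(s,16) never raises here: c is a decimal digit of str(n), so .getD 0 is never used;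
--  shift is ≥ 0 whenever the shift is performed, so .toNat is exact)
def bcdStepA (st : Int × Int) (c : Char) : Int × Int :=
  (PySem.Int.bor st.1 (((PySem.Int.ofCharsBase? [c] 16).getD 0) <<< (4 * st.2).toNat),
   st.2 - 1)

def to_bcd (n : Int) : Option Int :=
  if n < 0 then none
  else
    let cs := PySem.Int.toChars n            -- str(n)
    some ((cs.foldl bcdStepA (0, PySem.List.len cs - 1)).1)

-- ===== PORT B =====
-- while n > 0: result |= (n % 10) << (4 * shift); shift += 1; n //= 10
-- (n ≥ 0 on entry to the loop, so the state lives in Nat)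
def bcdLoopB (m result shift : Nat) : Nat :=
  if h : m = 0 then result
  else bcdLoopB (m / 10) (result ||| ((m % 10) <<< (4 * shift))) (shift + 1)
termination_by m
decreasing_by exact Nat.div_lt_self (Nat.pos_of_ne_zero h) (by omega)

def to_bcd_alt (n : Int) : Option Int :=
  if n < 0 then none
  else some ((bcdLoopB n.toNat 0 0 : Nat) : Int)

-- ===== PRECONDITION & SPEC =====
def Spec_to_bcd (n : Int) (out : Option Int) : Prop := out = to_bcd_alt n
instance (n : Int) (out : Option Int) : Decidable (Spec_to_bcd n out) := by unfold Spec_to_bcd; infer_instance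

-- ===== CLAIM (what is proved, stated in full; the proofs are below) =====
def Claim_equal_to_bcd : Prop := ∀ (n : Int), Dom_to_bcd n → Spec_to_bcd n (to_bcd n)

-- ===== LEMMAS AND PROOFS =====

-- the mathematical value both programs compute: the BCD encoding of m
def valB (m : Nat) : Nat :=
  if h : m = 0 then 0 else valB (m / 10) * 16 + m % 10
termination_by m
decreasing_by exact Nat.div_lt_self (Nat.pos_of_ne_zero h) (by omega)

-- decimal digits of m, most significant first
def myDigits (m : Nat) : List Nat :=
  if m < 10 then [m] else myDigits (m / 10) ++ [m % 10]
termination_by m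
decreasing_by exact Nat.div_lt_self (by omega) (by omega)

-- base-16 accumulator fold (A's digit-by-digit assembly, read MSB first)
def vAcc (a : Nat) (ds : List Nat) : Nat := ds.foldl (fun a d => a * 16 + d) a

lemma sixteen_pow (k : Nat) : (16 : Nat) ^ k = 2 ^ (4 * k) := by
  rw [show (16:Nat) = 2 ^ 4 from rfl, ← pow_mul]

lemma or_eq_add_of_mod_eq_zero {a b k : Nat} (ha : a % 2 ^ k = 0) (hb : b < 2 ^ k) :
    a ||| b = a + b := by
  obtain ⟨q, hq⟩ : 2 ^ k ∣ a := Nat.dvd_of_mod_eq_zero ha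
  subst hq
  rw [Nat.mul_comm, ← Nat.shiftLeft_eq]
  exact (Nat.shiftLeft_add_eq_or_of_lt hb q).symm

lemma digits_lt (m : Nat) : ∀ d ∈ myDigits m, d < 10 := by
  induction m using Nat.strong_induction_on with
  | _ m ih =>
    rw [myDigits]
    split_ifs with h
    · intro d hd; simp at hd; omega
    · intro d hd
      rcases List.mem_append.mp hd with h1 | h1
      · exact ih (m / 10) (Nat.div_lt_self (by omega) (by omega)) d h1
      · simp at h1; omega

lemma myDigits_ne_nil (m : Nat) : myDigits m ≠ [] := by
  rw [myDigits]; split_ifs <;> simp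

lemma vAcc_acc (ds : List Nat) : ∀ a, vAcc a ds = a * 16 ^ ds.length + vAcc 0 ds := by
  induction ds with
  | nil => intro a; simp [vAcc]
  | cons d ds ih =>
    intro a
    simp only [vAcc, List.foldl_cons] at *
    rw [ih (a * 16 + d), ih (0 * 16 + d), List.length_cons, pow_succ]
    ring

lemma vAcc_myDigits (m : Nat) : vAcc 0 (myDigits m) = valB m := by
  induction m using Nat.strong_induction_on with
  | _ m ih =>
    rw [myDigits, valB]
    split_ifs with h1 h2
    · subst h2; simp [vAcc]
    · simp [vAcc]
      rw [valB]
      simp [Nat.div_eq_of_lt h1, Nat.mod_eq_of_lt h1]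
    · omega
    · simp only [vAcc, List.foldl_append, List.foldl_cons, List.foldl_nil]
      have := ih (m / 10) (Nat.div_lt_self (by omega) (by omega))
      simp only [vAcc] at this
      rw [this]

lemma hexDigit (d : Nat) (hd : d < 10) :
    PySem.Int.ofCharsBase? [Nat.digitChar d] 16 = some (d : Int) := by
  interval_cases d <;> decide

lemma toDigitsCore_eq : ∀ (f m : Nat) (acc : List Char), m < f →
    Nat.toDigitsCore 10 f m acc = (myDigits m).map Nat.digitChar ++ acc := by
  intro f
  induction f with
  | zero => intro m acc h; omega
  | succ f ih =>
    intro m acc h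
    rw [Nat.toDigitsCore, myDigits]
    by_cases h10 : m < 10
    · have hdiv : m / 10 = 0 := Nat.div_eq_of_lt h10
      simp [hdiv, h10, Nat.mod_eq_of_lt h10]
    · have hne : ¬ m / 10 = 0 := by
        intro hc
        have := Nat.div_eq_zero_iff.mp hc
        omega
      simp only [h10, if_false, hne]
      rw [ih (m / 10) (Nat.digitChar (m % 10) :: acc)
          (by have := Nat.div_lt_self (show 0 < m by omega) (show 1 < 10 by omega); omega)]
      simp

lemma cast_shiftLeft (d k : Nat) : ((d : Int) <<< k) = ((d <<< k : Nat) : Int) := by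
  simp [Int.shiftLeft_eq, Nat.shiftLeft_eq]

lemma foldA_eq (ds : List Nat) : ∀ (r sh : Nat), (∀ d ∈ ds, d < 10) →
    ds.length ≤ sh + 1 → r % 16 ^ (sh + 1) = 0 →
    ((ds.map Nat.digitChar).foldl bcdStepA ((r : Int), (sh : Int))).1
      = ((r + vAcc 0 ds * 16 ^ (sh + 1 - ds.length) : Nat) : Int) := by
  induction ds with
  | nil => intro r sh _ _ _; simp [vAcc]
  | cons d ds ih =>
    intro r sh hd hlen hr
    have hd0 : d < 10 := hd d List.mem_cons_self
    have hstep : bcdStepA ((r : Int), (sh : Int)) (Nat.digitChar d)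
        = (((r + d * 16 ^ sh : Nat) : Int), (sh : Int) - 1) := by
      simp only [bcdStepA, hexDigit d hd0, Option.getD_some]
      have h4 : (4 * (sh : Int)).toNat = 4 * sh := by omega
      rw [h4, cast_shiftLeft, PySem.Int.bor_natCast]
      have hor : r ||| (d <<< (4 * sh)) = r + d * 16 ^ sh := by
        have hlt : d <<< (4 * sh) < 2 ^ (4 * (sh + 1)) := by
          rw [Nat.shiftLeft_eq, show 4 * (sh + 1) = 4 + 4 * sh by ring, pow_add,
              show (2:Nat) ^ 4 = 16 from rfl]
          have h2 : (0:Nat) < 2 ^ (4 * sh) := Nat.pow_pos (by omega)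
          nlinarith
        have hmod : r % 2 ^ (4 * (sh + 1)) = 0 := by rw [← sixteen_pow]; exact hr
        rw [or_eq_add_of_mod_eq_zero hmod hlt, Nat.shiftLeft_eq, ← sixteen_pow]
      rw [hor]
    rw [List.map_cons, List.foldl_cons, hstep]
    by_cases hds : ds = []
    · subst hds
      simp only [List.map_nil, List.foldl_nil, List.length_cons, List.length_nil]
      have hv : vAcc 0 [d] = d := by simp [vAcc]
      rw [hv]
      norm_num
    · cases sh with
      | zero =>
        have hnil : ds = [] := by
          have : ds.length = 0 := by
            have := hlen
            simp only [List.length_cons] at this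
            omega
          exact List.length_eq_zero_iff.mp this
        exact absurd hnil hds
      | succ t =>
        have hcast : (((t : Nat) + 1 : Nat) : Int) - 1 = ((t : Nat) : Int) := by push_cast; ring
        rw [hcast]
        have hlen' : ds.length ≤ t + 1 := by
          simp only [List.length_cons] at hlen
          omega
        have hdvd : (16 : Nat) ^ (t + 1) ∣ r :=
          (pow_dvd_pow 16 (by omega : t + 1 ≤ t + 1 + 1)).trans (Nat.dvd_of_mod_eq_zero hr)
        have hr' : (r + d * 16 ^ (t + 1)) % 16 ^ (t + 1) = 0 := by
          rcases Nat.dvd_add hdvd (dvd_mul_left (16 ^ (t + 1)) d) with ⟨c, hc⟩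
          simp [hc, Nat.mul_mod_right]
        rw [ih (r + d * 16 ^ (t + 1)) t (fun x hx => hd x (List.mem_cons_of_mem d hx)) hlen' hr']
        congr 1
        rw [List.length_cons]
        have hsub : t + 1 + 1 - (ds.length + 1) = t + 1 - ds.length := by omega
        rw [hsub]
        have hvc : vAcc 0 (d :: ds) = d * 16 ^ ds.length + vAcc 0 ds := by
          have : vAcc 0 (d :: ds) = vAcc d ds := by simp [vAcc]
          rw [this, vAcc_acc]
        rw [hvc, Nat.add_mul, mul_assoc, ← Nat.pow_add,
            show ds.length + (t + 1 - ds.length) = t + 1 by omega]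
        ring

lemma toA (m : Nat) : to_bcd (m : Int) = some ((valB m : Nat) : Int) := by
  have hneg : ¬ ((m : Int) < 0) := by omega
  have hchars : PySem.Int.toChars (m : Int) = (myDigits m).map Nat.digitChar := by
    have h1 : PySem.Int.toChars (m : Int) = Nat.toDigits 10 m := by
      simp [PySem.Int.toChars]
    rw [h1, show Nat.toDigits 10 m = Nat.toDigitsCore 10 (m + 1) m [] from rfl,
        toDigitsCore_eq (m + 1) m [] (by omega), List.append_nil]
  have hL : 1 ≤ (myDigits m).length := List.length_pos_iff.mpr (myDigits_ne_nil m)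
  simp only [to_bcd, if_neg hneg, hchars]
  have hlen : PySem.List.len ((myDigits m).map Nat.digitChar) - 1
      = (((myDigits m).length - 1 : Nat) : Int) := by
    simp [PySem.List.len_eq]
    omega
  rw [hlen, show (0 : Int) = ((0 : Nat) : Int) from rfl,
      foldA_eq (myDigits m) 0 ((myDigits m).length - 1) (digits_lt m) (by omega) (Nat.zero_mod _),
      show (myDigits m).length - 1 + 1 - (myDigits m).length = 0 by omega]
  simp [vAcc_myDigits m]

lemma loopB_eq (m : Nat) : ∀ (r sh : Nat), r < 16 ^ sh →
    bcdLoopB m r sh = r + valB m * 16 ^ sh := by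
  induction m using Nat.strong_induction_on with
  | _ m ih =>
    intro r sh hr
    rw [bcdLoopB, valB]
    split_ifs with h
    · simp
    · have hor : r ||| ((m % 10) <<< (4 * sh)) = r + (m % 10) * 16 ^ sh := by
        rw [Nat.lor_comm]
        have hmod : ((m % 10) <<< (4 * sh)) % 2 ^ (4 * sh) = 0 := by
          rw [Nat.shiftLeft_eq, Nat.mul_mod_left]
        have hlt : r < 2 ^ (4 * sh) := by rw [← sixteen_pow]; exact hr
        rw [or_eq_add_of_mod_eq_zero hmod hlt, Nat.shiftLeft_eq, ← sixteen_pow]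
        ring
      rw [hor, ih (m / 10) (Nat.div_lt_self (by omega) (by omega))
            (r + (m % 10) * 16 ^ sh) (sh + 1)
            (by
              have h16 : (0:Nat) < 16 ^ sh := Nat.pow_pos (by omega)
              have hm : m % 10 ≤ 9 := by omega
              calc r + (m % 10) * 16 ^ sh < 16 ^ sh + 9 * 16 ^ sh + 1 := by nlinarith
                _ ≤ 16 ^ (sh + 1) := by rw [pow_succ]; nlinarith),
          pow_succ]
      ring

-- ===== VERDICT (by name: the statement is the Claim_ definition above) =====
theorem to_bcd_spec : Claim_equal_to_bcd := by
  intro n _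
  unfold Spec_to_bcd
  by_cases h : n < 0
  · simp [to_bcd, to_bcd_alt, h]
  · obtain ⟨m, rfl⟩ : ∃ m : Nat, n = (m : Int) :=
      ⟨n.toNat, (Int.toNat_of_nonneg (by omega)).symm⟩
    rw [toA]
    have : to_bcd_alt (m : Int) = some ((bcdLoopB m 0 0 : Nat) : Int) := by
      simp [to_bcd_alt, h]
    rw [this, loopB_eq m 0 0 (by norm_num)]
    norm_num
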